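/- GENERATED by tools/from_farm_form.py from prooffarm-gif/accepted/DGifGetLine.1/Proof.lean (a worked proof of the farm's unit `DGifGetLine.1`,
   accepted by the verdict) — do not edit. -/
import Gif.Spec.Units.DGifGetLine_1
import Gif.Spec.AllSegs
import Gif.Spec.Proved.DGifGetLine_1_Lemmas

open X86 X86.User Asan ProgX.Base ProgX.Base.Spec Gif.Spec

/-!
  `DGifGetLine.1` (0x10a230 … 0x10a28e and 0x10a2ab … 0x10a2c4, 33 instructions; dgif_lib.c:486-502): the tests of `DGifGetLine`, a body
  segment of a protected function without a contract call. The walk and the carry lemma are in Lemmas.lean (`gl1_seg`,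
  `gl1_carry`).
-/

namespace Gif.Spec.DGifGetLine_1
end Gif.Spec.DGifGetLine_1

/-- Segment 1 of `DGifGetLine` takes `AfterP` at 0x10a230 to `AtCall` at 0x10a2c4 or `Done` at 0x10a28e. -/
theorem Gif.Spec.Proved.DGifGetLine_1_ok : Gif.Spec.DGifGetLine_1.Statement := by
  unfold Gif.Spec.DGifGetLine_1.Statement
  intro Lay hLay μ hμ u₀ hcode h_asan_load8_noabort h_asan_load4_noabort h_asan_store4_noabort
  intro H rest frames F R n e ret v hat
  exact Gif.Spec.DGifGetLine_1.gl1_seg Lay hLay μ hμ u₀ hcode h_asan_load8_noabort h_asan_load4_noabort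
    h_asan_store4_noabort H rest frames F R n e ret v hat
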